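-- pv_equiv track=rewrite | github.com/ysl-lab/CP_tutorial | 2_production/Py_write_bemeta_phiPpsiP_omega_all.py | get_omega
-- ===== SOURCE A (Python) =====
-- def get_omega(num_res,resids,residues,atoms,indexes):
--    NMA=[]
--    #ALL=[]
--    #for i in range(len(residues)):
--       #if residues[i] == 'NMA' and resids[i] not in NMA: NMA.append(resids[i])
--       #if residues[i] == 'NMA' or residues[i] == 'ALA' and resids[i] not in NMA: ALL.append(resids[i])
--    #print ALL
--    for i in range(1,num_res+1): NMA.append(i)
--    #print NMA
--
--    omega=[]
--    #for i in range(1,num_res+1):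
--    for i in NMA:
--       if i == 1: prev_res=num_res
--       else: prev_res=i-1
--       temp=[]
--       for n in range(len(residues)):
--          if resids[n] == prev_res and atoms[n] == 'CA': temp.append(indexes[n])
--       for n in range(len(residues)):
--          if resids[n] == prev_res and atoms[n] == 'C': temp.append(indexes[n])
--       for n in range(len(residues)):
--          if resids[n] == i and atoms[n] == 'N': temp.append(indexes[n])
--       for n in range(len(residues)):
--          if resids[n] == i and atoms[n] == 'CA': temp.append(indexes[n])
--       omega.append(temp)
--    #print omega
--    return omega,NMA
-- ===== SOURCE B (Python) =====
-- def get_omega(num_res, resids, residues, atoms, indexes):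
--     # one grouping pass: bucket atom indexes by (resid, atom name), then constant-time lookups per residue
--     groups = {}
--     for r, _res, a, idx in zip(resids, residues, atoms, indexes):
--         groups.setdefault((r, a), []).append(idx)
--     NMA = list(range(1, num_res + 1))
--     omega = []
--     for i in NMA:
--         prev = num_res if i == 1 else i - 1
--         omega.append(groups.get((prev, 'CA'), []) + groups.get((prev, 'C'), [])
--                      + groups.get((i, 'N'), []) + groups.get((i, 'CA'), []))
--     return omega, NMA
-- ===== Notes on version B (the rewrite author's own statement) =====
-- stated objective: faster
-- what changed: Replaced A's four nested full scans of the atom table per residue by one grouping pass that buckets atom indexes in a dict keyed by (resid, atom name), so each residue's omega list is four constant-time lookups.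
import Mathlib
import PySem

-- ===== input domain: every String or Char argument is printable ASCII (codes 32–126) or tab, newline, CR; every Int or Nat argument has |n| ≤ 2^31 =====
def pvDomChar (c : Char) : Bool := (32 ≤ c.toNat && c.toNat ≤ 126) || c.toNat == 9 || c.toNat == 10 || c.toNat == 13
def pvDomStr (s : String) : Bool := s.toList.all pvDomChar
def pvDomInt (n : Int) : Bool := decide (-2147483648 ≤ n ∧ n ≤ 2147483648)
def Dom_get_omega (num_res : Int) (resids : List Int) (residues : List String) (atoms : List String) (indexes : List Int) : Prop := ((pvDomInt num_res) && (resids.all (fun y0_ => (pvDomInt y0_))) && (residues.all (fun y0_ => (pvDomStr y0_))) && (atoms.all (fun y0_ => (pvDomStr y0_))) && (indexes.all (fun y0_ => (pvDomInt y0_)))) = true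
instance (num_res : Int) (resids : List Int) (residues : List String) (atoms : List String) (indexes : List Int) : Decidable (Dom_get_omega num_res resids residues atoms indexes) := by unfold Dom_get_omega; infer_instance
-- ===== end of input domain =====

-- B replaces A's four nested full scans of the atom table per residue by one grouping
-- pass into a dict keyed by (resid, atom name) with four lookups per residue (faster).


-- ===== PORT A =====
def get_omega (num_res : Int) (resids : List Int) (residues : List String) (atoms : List String) (indexes : List Int) : List (List Int) × List Int :=
  let NMA : List Int := (PySem.List.pyRange 1 (num_res + 1) 1).foldl (fun a i => a ++ [i]) []
  let omega : List (List Int) :=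
    NMA.foldl (fun omega i =>
      let prev_res : Int := if i = 1 then num_res else i - 1
      let temp : List Int :=
        (PySem.List.pyRange 0 (residues.length : Int) 1).foldl (fun t n =>
          if PySem.List.pyGetD resids n 0 = prev_res ∧ PySem.List.pyGetD atoms n "" = "CA"
          then t ++ [PySem.List.pyGetD indexes n 0] else t) []
      let temp :=
        (PySem.List.pyRange 0 (residues.length : Int) 1).foldl (fun t n =>
          if PySem.List.pyGetD resids n 0 = prev_res ∧ PySem.List.pyGetD atoms n "" = "C"
          then t ++ [PySem.List.pyGetD indexes n 0] else t) temp
      let temp :=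
        (PySem.List.pyRange 0 (residues.length : Int) 1).foldl (fun t n =>
          if PySem.List.pyGetD resids n 0 = i ∧ PySem.List.pyGetD atoms n "" = "N"
          then t ++ [PySem.List.pyGetD indexes n 0] else t) temp
      let temp :=
        (PySem.List.pyRange 0 (residues.length : Int) 1).foldl (fun t n =>
          if PySem.List.pyGetD resids n 0 = i ∧ PySem.List.pyGetD atoms n "" = "CA"
          then t ++ [PySem.List.pyGetD indexes n 0] else t) temp
      omega ++ [temp]) []
  (omega, NMA)

-- ===== PORT B =====
def get_omega_alt (num_res : Int) (resids : List Int) (residues : List String) (atoms : List String) (indexes : List Int) : List (List Int) × List Int :=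
  let groups : PySem.Dict (Int × String) (List Int) :=
    (resids.zip (residues.zip (atoms.zip indexes))).foldl
      (fun g q => g.modify (q.1, q.2.2.1) [] (· ++ [q.2.2.2])) PySem.Dict.empty
  let NMA : List Int := PySem.List.pyRange 1 (num_res + 1) 1
  let omega : List (List Int) :=
    NMA.foldl (fun omega i =>
      let prev : Int := if i = 1 then num_res else i - 1
      omega ++ [groups.getD (prev, "CA") [] ++ groups.getD (prev, "C") [] ++
                groups.getD (i, "N") [] ++ groups.getD (i, "CA") []]) []
  (omega, NMA)

-- ===== PRECONDITION & SPEC =====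
-- Pre_ = exactly the inputs on which Python A returns: when num_res ≥ 1 every position of
-- residues must be readable in resids, and (by the 'and' short-circuit) atoms / indexes are
-- only read where the earlier conjuncts can hold, i.e. where the resid lies in 1..num_res
-- (resp. and the atom name is one of 'CA','C','N').
def Pre_get_omega (num_res : Int) (resids : List Int) (residues : List String) (atoms : List String) (indexes : List Int) : Prop :=
  1 ≤ num_res →
    (residues.length ≤ resids.length ∧
     ∀ n : Nat, n < residues.length →
       1 ≤ resids.getD n 0 → resids.getD n 0 ≤ num_res →
         (n < atoms.length ∧
          ((atoms.getD n "" = "CA" ∨ atoms.getD n "" = "C" ∨ atoms.getD n "" = "N") →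
            n < indexes.length)))
instance (num_res : Int) (resids : List Int) (residues : List String) (atoms : List String) (indexes : List Int) : Decidable (Pre_get_omega num_res resids residues atoms indexes) := by unfold Pre_get_omega; infer_instance

def pvWitness_get_omega : Int × List Int × List String × List String × List Int :=
  (2, [1, 1, 1, 2, 2, 2], ["ALA", "ALA", "ALA", "NMA", "NMA", "NMA"],
   ["N", "CA", "C", "N", "CA", "C"], [10, 11, 12, 13, 14, 15])

def Spec_get_omega (num_res : Int) (resids : List Int) (residues : List String) (atoms : List String) (indexes : List Int) (out : List (List Int) × List Int) : Prop := out = get_omega_alt num_res resids residues atoms indexes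
instance (num_res : Int) (resids : List Int) (residues : List String) (atoms : List String) (indexes : List Int) (out : List (List Int) × List Int) : Decidable (Spec_get_omega num_res resids residues atoms indexes out) := by unfold Spec_get_omega; infer_instance

-- ===== CLAIM (what is proved, stated in full; the proofs are below) =====
def Claim_equal_get_omega : Prop := ∀ (num_res : Int) (resids : List Int) (residues : List String) (atoms : List String) (indexes : List Int), Dom_get_omega num_res resids residues atoms indexes → Pre_get_omega num_res resids residues atoms indexes → Spec_get_omega num_res resids residues atoms indexes (get_omega num_res resids residues atoms indexes)

-- ===== LEMMAS AND PROOFS =====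

-- the list of indexes selected by one of A's scans, over the first k positions
def pvSel (resids : List Int) (atoms : List String) (indexes : List Int) (r : Int) (a : String) (k : Nat) : List Int :=
  ((List.range k).filter (fun n => decide (resids.getD n 0 = r) && decide (atoms.getD n "" = a))).map
    (fun n => indexes.getD n 0)

theorem pvSel_stable (resids : List Int) (atoms : List String) (indexes : List Int) (r : Int) (a : String) (k m : Nat) (hk : k ≤ m)
    (h : ∀ n : Nat, k ≤ n → n < m → ¬(resids.getD n 0 = r ∧ atoms.getD n "" = a)) :
    pvSel resids atoms indexes r a m = pvSel resids atoms indexes r a k := by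
  induction m with
  | zero => have : k = 0 := by omega
            simp [this]
  | succ m ih =>
    rcases Nat.eq_or_lt_of_le hk with h1 | h1
    · simp [h1]
    · have hm : ¬(resids.getD m 0 = r ∧ atoms.getD m "" = a) := h m (by omega) (by omega)
      rw [← ih (by omega) (fun n hn1 hn2 => h n hn1 (by omega))]
      simp only [List.getD] at hm
      simp only [pvSel, List.range_succ, List.filter_append, List.map_append,
        List.filter_singleton]
      rcases Decidable.not_and_iff_not_or_not.mp hm with h' | h' <;> simp [h']

-- one of A's scans over range(len(residues)) is pvSel over the first len(residues) positions
theorem pvScanA (resids : List Int) (atoms : List String) (indexes : List Int) (r : Int) (a : String) (m : Nat) (t : List Int) :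
    (PySem.List.pyRange 0 (m : Int) 1).foldl (fun t n =>
        if PySem.List.pyGetD resids n 0 = r ∧ PySem.List.pyGetD atoms n "" = a
        then t ++ [PySem.List.pyGetD indexes n 0] else t) t
    = t ++ pvSel resids atoms indexes r a m := by
  rw [PySem.List.pyRange_zero_natCast, List.foldl_map]
  simp only [PySem.List.pyGetD_natCast]
  rw [PySem.List.foldl_append_ite (fun n => resids.getD n 0 = r ∧ atoms.getD n "" = a)
       (fun n => indexes.getD n 0)]
  simp [pvSel]

-- the zipped atom table, re-keyed, is the table read off positionally
theorem pvZipEq (resids : List Int) (residues : List String) (atoms : List String) (indexes : List Int) :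
    (resids.zip (residues.zip (atoms.zip indexes))).map (fun q => ((q.1, q.2.2.1), q.2.2.2))
    = (List.range (resids.zip (residues.zip (atoms.zip indexes))).length).map
        (fun n => ((resids.getD n 0, atoms.getD n ""), indexes.getD n 0)) := by
  apply List.ext_getElem
  · simp
  · intro i h1 h2
    have hr : i < resids.length := by simp at h1; omega
    have ha : i < atoms.length := by simp at h1; omega
    have hx : i < indexes.length := by simp at h1; omega
    simp [List.getElem_zip, hr, ha, hx]

-- B's grouping dict, looked up at any key, is pvSel over the zipped length
theorem pvGroupB (resids : List Int) (residues : List String) (atoms : List String) (indexes : List Int) (r : Int) (a : String) :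
    ((resids.zip (residues.zip (atoms.zip indexes))).foldl
       (fun g q => g.modify (q.1, q.2.2.1) [] (· ++ [q.2.2.2])) PySem.Dict.empty).getD (r, a) []
    = pvSel resids atoms indexes r a (resids.zip (residues.zip (atoms.zip indexes))).length := by
  rw [← List.foldl_map (f := fun q : Int × String × String × Int => ((q.1, q.2.2.1), q.2.2.2))
        (g := fun (d : PySem.Dict (Int × String) (List Int)) p => d.modify p.1 [] (· ++ [p.2]))]
  rw [PySem.Dict.getD_foldl_modify_append, pvZipEq]
  simp only [pvSel, List.filter_map, List.map_map, Function.comp_def, PySem.Dict.getD_empty,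
    List.nil_append]
  refine congrArg (List.map _) (List.filter_congr fun x _ => ?_)
  cases h1 : decide (resids.getD x 0 = r) <;> cases h2 : decide (atoms.getD x "" = a) <;>
    simp_all [Prod.ext_iff]

theorem get_omega_spec : Claim_equal_get_omega := by
  intro num_res resids residues atoms indexes _hdom hpre
  unfold Spec_get_omega get_omega get_omega_alt
  simp only [PySem.List.foldl_append_singleton_eq_self, List.nil_append,
    PySem.List.foldl_append_singleton_eq_map]
  refine Prod.ext ?_ rfl
  apply List.map_congr_left
  intro i hi
  rw [PySem.List.mem_pyRange_one] at hi
  have hnum : 1 ≤ num_res := by omega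
  obtain ⟨hlen, hP⟩ := hpre hnum
  have hmain : ∀ r : Int, ∀ a : String, 1 ≤ r → r ≤ num_res →
      (a = "CA" ∨ a = "C" ∨ a = "N") →
      pvSel resids atoms indexes r a residues.length
      = pvSel resids atoms indexes r a (resids.zip (residues.zip (atoms.zip indexes))).length := by
    intro r a hr1 hr2 haset
    apply pvSel_stable
    · simp only [List.length_zip]; omega
    · intro n hn1 hn2 hcontra
      obtain ⟨he1, he2⟩ := hcontra
      simp only [List.length_zip] at hn1
      obtain ⟨hna, hni⟩ := hP n hn2 (by omega) (by omega)
      have hnix : n < indexes.length := hni (by rw [he2]; rcases haset with h | h | h <;> rw [h] <;> tauto)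
      omega
  have hprev : 1 ≤ (if i = 1 then num_res else i - 1) ∧ (if i = 1 then num_res else i - 1) ≤ num_res := by
    split <;> omega
  rw [pvScanA, pvScanA, pvScanA, pvScanA,
      pvGroupB, pvGroupB, pvGroupB, pvGroupB,
      hmain _ _ hprev.1 hprev.2 (Or.inl rfl),
      hmain _ _ hprev.1 hprev.2 (Or.inr (Or.inl rfl)),
      hmain _ _ (by omega) (by omega) (Or.inr (Or.inr rfl)),
      hmain _ _ (by omega) (by omega) (Or.inl rfl)]
  simp
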